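-- pv_equiv track=rewrite | github.com/sauerwei/My-First-Chip-DYC26 | chips/10-sandpile/design_data/Chip/M7_Trng/test/test_trng.py | keccak_round
-- ===== SOURCE A (Python) =====
-- def keccak_round(s):
--     theta = 0
--     for i in range(25):
--         bit_i  = (s >> i) & 1
--         bit_5  = (s >> ((i + 5) % 25)) & 1
--         bit_20 = (s >> ((i + 20) % 25)) & 1
--
--         res_theta = bit_i ^ bit_5 ^ bit_20
--         theta |= (res_theta << i)
--
--     pi = 0
--     for i in range(25):
--         bit_theta = (theta >> i) & 1
--         new_pos = (i * 7) % 25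
--         pi |= (bit_theta << new_pos)
--
--     chi = 0
--     for i in range(25):
--         curr_bit  = (pi >> i) & 1
--         next_bit  = (pi >> ((i + 1) % 25)) & 1
--         next2_bit = (pi >> ((i + 2) % 25)) & 1
--
--         res_chi = curr_bit ^ ((next_bit ^ 1) & next2_bit)
--         chi |= (res_chi << i)
--
--     return chi & 0x1FFFFFF
-- ===== SOURCE B (Python) =====
-- def keccak_round(s):
--     # Word-parallel theta via 25-bit rotations, then a single fused loop that
--     # composes pi (bit j of pi is theta bit 18*j % 25, since 7*18 == 1 mod 25)
--     # with chi, so no intermediate theta/pi/chi integers are accumulated bit by bit.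
--     MASK = 0x1FFFFFF
--
--     def rot(w, k):
--         # rotate the 25-bit word w right by k
--         return ((w >> k) | (w << (25 - k))) & MASK
--
--     n = s & MASK
--     t = n ^ rot(n, 5) ^ rot(n, 20)
--     out = 0
--     for i in range(25):
--         a = (t >> (18 * i % 25)) & 1
--         b = (t >> (18 * (i + 1) % 25)) & 1
--         c = (t >> (18 * (i + 2) % 25)) & 1
--         out |= (a ^ ((b ^ 1) & c)) << i
--     return out
-- ===== Notes on version B (the rewrite author's own statement) =====
-- stated objective: alternative
-- what changed: A builds theta, pi and chi as three staged per-bit shift-mask-OR accumulation loops; B computes theta word-parallel as n ^ rot(n,5) ^ rot(n,20) with 25-bit rotations and then fuses pi and chi into one loop that reads theta directly at the inverse-permuted indices 18*i % 25 (7*18 = 1 mod 25), never materialising the theta-per-bit, pi or chi integers.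
import Mathlib
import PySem

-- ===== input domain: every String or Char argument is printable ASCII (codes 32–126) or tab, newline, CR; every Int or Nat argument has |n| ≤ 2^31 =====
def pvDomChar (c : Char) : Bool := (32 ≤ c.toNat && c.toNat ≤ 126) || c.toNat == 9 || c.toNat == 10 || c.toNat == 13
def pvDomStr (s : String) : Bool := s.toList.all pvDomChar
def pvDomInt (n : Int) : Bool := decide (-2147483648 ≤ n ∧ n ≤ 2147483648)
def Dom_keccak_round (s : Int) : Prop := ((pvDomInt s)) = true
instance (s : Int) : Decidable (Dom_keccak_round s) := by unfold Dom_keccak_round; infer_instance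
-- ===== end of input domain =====

-- B replaces A's three staged per-bit accumulation loops by a word-parallel theta
-- (n ^ rot(n,5) ^ rot(n,20) on the 25-bit word) followed by ONE fused loop that
-- composes pi with chi by reading theta at the inverse-permuted indices 18*i % 25
-- (7*18 ≡ 1 mod 25); objective: alternative (same cost, no intermediate stages).

-- ===== PORT A =====
def keccak_round (s : Int) : Int :=
  let theta := (List.range 25).foldl (fun (theta : Int) (i : Nat) =>
    let bit_i := PySem.Int.band (s >>> i) 1
    let bit_5 := PySem.Int.band (s >>> ((i + 5) % 25)) 1
    let bit_20 := PySem.Int.band (s >>> ((i + 20) % 25)) 1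
    let res_theta := PySem.Int.bxor (PySem.Int.bxor bit_i bit_5) bit_20
    PySem.Int.bor theta (res_theta <<< i)) 0
  let pi := (List.range 25).foldl (fun (pi : Int) (i : Nat) =>
    let bit_theta := PySem.Int.band (theta >>> i) 1
    let new_pos := (i * 7) % 25
    PySem.Int.bor pi (bit_theta <<< new_pos)) 0
  let chi := (List.range 25).foldl (fun (chi : Int) (i : Nat) =>
    let curr_bit := PySem.Int.band (pi >>> i) 1
    let next_bit := PySem.Int.band (pi >>> ((i + 1) % 25)) 1
    let next2_bit := PySem.Int.band (pi >>> ((i + 2) % 25)) 1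
    let res_chi := PySem.Int.bxor curr_bit (PySem.Int.band (PySem.Int.bxor next_bit 1) next2_bit)
    PySem.Int.bor chi (res_chi <<< i)) 0
  PySem.Int.band chi 0x1FFFFFF

-- ===== PORT B =====
-- rotate the 25-bit word w right by k (Source B's helper 'rot')
def rotB (w : Int) (k : Nat) : Int :=
  PySem.Int.band (PySem.Int.bor (w >>> k) (w <<< (25 - k))) 0x1FFFFFF

def keccak_round_alt (s : Int) : Int :=
  let n := PySem.Int.band s 0x1FFFFFF
  let t := PySem.Int.bxor (PySem.Int.bxor n (rotB n 5)) (rotB n 20)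
  (List.range 25).foldl (fun (out : Int) (i : Nat) =>
    let a := PySem.Int.band (t >>> (18 * i % 25)) 1
    let b := PySem.Int.band (t >>> (18 * (i + 1) % 25)) 1
    let c := PySem.Int.band (t >>> (18 * (i + 2) % 25)) 1
    PySem.Int.bor out ((PySem.Int.bxor a (PySem.Int.band (PySem.Int.bxor b 1) c)) <<< i)) 0

-- ===== PRECONDITION & SPEC =====
def Spec_keccak_round (s : Int) (out : Int) : Prop := out = keccak_round_alt s
instance (s : Int) (out : Int) : Decidable (Spec_keccak_round s out) := by unfold Spec_keccak_round; infer_instance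

-- ===== CLAIM (what is proved, stated in full; the proofs are below) =====
def Claim_equal_keccak_round : Prop := ∀ (s : Int), Dom_keccak_round s → Spec_keccak_round s (keccak_round s)

-- ===== LEMMAS AND PROOFS =====

def pack (f : Nat → Nat) (n : Nat) : Nat := (Finset.range n).sum fun i => f i * 2 ^ i

theorem pack_lt (f : Nat → Nat) (hf : ∀ i, f i ≤ 1) (n : Nat) : pack f n < 2 ^ n := by
  induction n with
  | zero => simp [pack]
  | succ n ih =>
    have := hf n
    simp only [pack, Finset.sum_range_succ] at *
    have h2 : (2:Nat) ^ (n+1) = 2^n + 2^n := by ring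
    have h3 : f n * 2 ^ n ≤ 2 ^ n := by
      calc f n * 2 ^ n ≤ 1 * 2 ^ n := Nat.mul_le_mul_right _ this
      _ = 2 ^ n := one_mul _
    omega

theorem pack_testBit (f : Nat → Nat) (hf : ∀ i, f i ≤ 1) (n j : Nat) (hj : j < n) :
    (pack f n).testBit j = decide (f j = 1) := by
  induction n with
  | zero => omega
  | succ n ih =>
    have hpack : pack f (n+1) = 2 ^ n * f n + pack f n := by
      simp [pack, Finset.sum_range_succ]; ring
    rw [hpack, Nat.testBit_two_pow_mul_add _ (pack_lt f hf n)]
    by_cases h : j < n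
    · simp [h, ih h]
    · have hjn : j = n := by omega
      subst hjn
      rcases Nat.le_one_iff_eq_zero_or_eq_one.1 (hf j) with h0 | h0 <;> simp [h0]

theorem pack_testBit_ge (f : Nat → Nat) (hf : ∀ i, f i ≤ 1) (n j : Nat) (hj : n ≤ j) :
    (pack f n).testBit j = false :=
  Nat.testBit_eq_false_of_lt (lt_of_lt_of_le (pack_lt f hf n) (Nat.pow_le_pow_right (by norm_num) hj))

theorem lor_shift (x c k : Nat) (hx : x < 2 ^ k) (hc : c ≤ 1) : x ||| (c <<< k) = x + c * 2 ^ k := by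
  interval_cases c
  · simp
  · have hsh : (1:Nat) <<< k = 2 ^ k := by rw [Nat.shiftLeft_eq, one_mul]
    rw [hsh, one_mul]
    apply Nat.eq_of_testBit_eq
    intro j
    have h : x + 2 ^ k = 2 ^ k * 1 + x := by ring
    rw [Nat.testBit_lor, h, Nat.testBit_two_pow_mul_add _ hx]
    by_cases hjk : j < k
    · simp [hjk, Nat.testBit_two_pow_of_ne (by omega : k ≠ j)]
    · by_cases hje : j = k
      · subst hje
        simp [Nat.testBit_eq_false_of_lt hx, Nat.testBit_two_pow_self]
      · have h1 : Nat.testBit x j = false := Nat.testBit_eq_false_of_lt (lt_of_lt_of_le hx (Nat.pow_le_pow_right (by norm_num) (by omega)))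
        have h2 : Nat.testBit 1 (j - k) = false := Nat.testBit_eq_false_of_lt (by
          have : (1:Nat) < 2 ^ (j - k) := by
            have : 0 < j - k := by omega
            calc (1:Nat) < 2 ^ 1 := by norm_num
            _ ≤ 2 ^ (j-k) := Nat.pow_le_pow_right (by norm_num) (by omega)
          exact this)
        simp [hjk, h1, h2, Nat.testBit_two_pow_of_ne (by omega : k ≠ j)]

def tb (n i : Nat) : Nat := (n.testBit i).toNat

theorem tb_le (n i : Nat) : tb n i ≤ 1 := by unfold tb; cases n.testBit i <;> simp

theorem tb_eq_mod (n i : Nat) : tb n i = (n >>> i) % 2 := by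
  unfold tb
  show (1 &&& (n >>> i) != 0).toNat = (n >>> i) % 2
  rw [Nat.one_and_eq_mod_two]
  rcases Nat.mod_two_eq_zero_or_one (n >>> i) with h | h <;> simp [h]

-- bit read of a nonneg Int
theorem bitread (m : Nat) (i : Nat) :
    PySem.Int.band ((m : Int) >>> i) 1 = ((tb m i : Nat) : Int) := by
  rw [← Int.natCast_shiftRight]
  have h1 : (1 : Int) = ((1 : Nat) : Int) := rfl
  rw [h1, PySem.Int.band_natCast, tb_eq_mod, Nat.and_one_is_mod]

-- pack bit read
theorem pack_read (f : Nat → Nat) (hf : ∀ i, f i ≤ 1) (j : Nat) (hj : j < 25) :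
    PySem.Int.band (((pack f 25 : Nat) : Int) >>> j) 1 = ((f j : Nat) : Int) := by
  rw [bitread]
  congr 1
  unfold tb
  rw [pack_testBit f hf 25 j hj]
  rcases Nat.le_one_iff_eq_zero_or_eq_one.1 (hf j) with h | h <;> simp [h]

def pvN (s : Int) : Nat := (s % 33554432).toNat

theorem pvN_lt (s : Int) : pvN s < 2 ^ 25 := by
  unfold pvN; omega

-- reading bit i < 25 of any Int s only sees s mod 2^25
theorem sbit (s : Int) (i : Nat) (hi : i < 25) :
    PySem.Int.band (s >>> i) 1 = ((tb (pvN s) i : Nat) : Int) := by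
  rw [PySem.Int.band_one]
  have hmod : PySem.Int.mod (s >>> i) 2 = (s >>> i) % 2 := by
    simp [PySem.Int.mod, Int.fmod_eq_emod_of_nonneg]
  rw [hmod, Int.shiftRight_eq_div_pow]
  have hq : s = (s % 33554432) + (s / 33554432) * 33554432 := by omega
  have h33 : (33554432 : Int) = (2 ^ (25 - i)) * ((2 ^ i : Nat) : Int) := by
    push_cast
    rw [← pow_add]
    have h25 : 25 - i + i = 25 := by omega
    rw [h25]
    norm_num
  have hsplit : s / (2 ^ i : Nat) = (s % 33554432) / (2 ^ i : Nat) + (s / 33554432) * (2 ^ (25 - i)) := by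
    conv_lhs => rw [hq]
    rw [h33, ← mul_assoc, Int.add_mul_ediv_right _ _ (by positivity)]
  rw [hsplit]
  have h2 : (2 : Int) ∣ 2 ^ (25 - i) := dvd_pow_self 2 (by omega)
  obtain ⟨c, hc⟩ := h2
  rw [hc]
  have hrn : s % 33554432 = ((pvN s : Nat) : Int) := by
    unfold pvN; omega
  rw [hrn, ← Int.natCast_div, tb_eq_mod, Nat.shiftRight_eq_div_pow]
  have hmul : s / 33554432 * (2 * c) = 2 * (s / 33554432 * c) := by ring
  rw [hmul]
  omega

-- or-accumulation at increasing positions packs the bits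
theorem orfold (g : Nat → Nat) (hg : ∀ i, g i ≤ 1) (m : Nat) :
    (List.range m).foldl (fun a i => PySem.Int.bor a (((g i : Nat) : Int) <<< i)) 0
      = ((pack g m : Nat) : Int) := by
  induction m with
  | zero => simp [pack]
  | succ m ih =>
    rw [List.range_succ, List.foldl_append, ih]
    simp only [List.foldl_cons, List.foldl_nil]
    rw [← Int.natCast_shiftLeft, PySem.Int.bor_natCast]
    rw [lor_shift _ _ _ (pack_lt g hg m) (hg m)]
    congr 1
    simp [pack, Finset.sum_range_succ]

-- cast fold: Int or-fold at scattered positions is the Nat or-fold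
theorem castfold (u : Nat → Nat) (σ : Nat → Nat) (l : List Nat) (a : Nat) :
    l.foldl (fun p i => PySem.Int.bor p (((u i : Nat) : Int) <<< σ i)) ((a : Nat) : Int)
      = ((l.foldl (fun p i => p ||| (u i <<< σ i)) a : Nat) : Int) := by
  induction l generalizing a with
  | nil => simp
  | cons x xs ih =>
    simp only [List.foldl_cons]
    rw [← Int.natCast_shiftLeft, PySem.Int.bor_natCast, ih]

-- bits of a Nat or-fold at scattered positions
theorem scatter_testBit (u : Nat → Nat) (σ : Nat → Nat) (l : List Nat) (a j : Nat) :
    (l.foldl (fun p i => p ||| (u i <<< σ i)) a).testBit j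
      = (a.testBit j || l.any fun i => decide (σ i ≤ j) && (u i).testBit (j - σ i)) := by
  induction l generalizing a with
  | nil => simp
  | cons x xs ih =>
    simp only [List.foldl_cons, List.any_cons]
    rw [ih, Nat.testBit_lor, Nat.testBit_shiftLeft]
    simp [Bool.or_assoc, ge_iff_le]

theorem testBit_pos_of_le_one (u k : Nat) (hu : u ≤ 1) (hk : 0 < k) : u.testBit k = false :=
  Nat.testBit_eq_false_of_lt (by
    calc u ≤ 1 := hu
    _ < 2 ^ 1 := by norm_num
    _ ≤ 2 ^ k := Nat.pow_le_pow_right (by norm_num) hk)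

theorem testBit_zero_of_le_one (u : Nat) (hu : u ≤ 1) : u.testBit 0 = decide (u = 1) := by
  rcases Nat.le_one_iff_eq_zero_or_eq_one.1 hu with h | h <;> simp [h]

-- the scattered or-fold with positions (i*7)%25 packs bit i at position (i*7)%25,
-- i.e. position j holds bit (j*18)%25
theorem scatter_pack (u : Nat → Nat) (hu : ∀ i, u i ≤ 1) :
    (List.range 25).foldl (fun p i => p ||| (u i <<< ((i * 7) % 25))) 0
      = pack (fun j => u ((j * 18) % 25)) 25 := by
  apply Nat.eq_of_testBit_eq
  intro j
  rw [scatter_testBit u (fun i => (i * 7) % 25) (List.range 25) 0 j]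
  have hupos : ∀ i k, 0 < k → (u i).testBit k = false := fun i k hk =>
    testBit_pos_of_le_one _ _ (hu i) hk
  have hu0 : ∀ i, (u i).testBit 0 = decide (u i = 1) := fun i =>
    testBit_zero_of_le_one _ (hu i)
  by_cases hj : j < 25
  · rw [pack_testBit _ (fun i => hu _) 25 j hj]
    interval_cases j <;> simp [List.range_succ, hupos, hu0]
  · rw [pack_testBit_ge _ (fun i => hu _) 25 j (by omega)]
    simp only [Nat.zero_testBit, Bool.false_or]
    rw [List.any_eq_false]
    intro i hi
    have hi25 : i < 25 := List.mem_range.mp hi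
    have hσ : (i * 7) % 25 < 25 := Nat.mod_lt _ (by norm_num)
    rw [testBit_pos_of_le_one _ _ (hu i) (by omega)]
    simp

-- the three per-stage bit functions of the common normal form, over n = s mod 2^25
def TN (n i : Nat) : Nat := tb n i ^^^ tb n ((i + 5) % 25) ^^^ tb n ((i + 20) % 25)
def PN (n j : Nat) : Nat := TN n ((j * 18) % 25)
def CN (n i : Nat) : Nat := PN n i ^^^ ((PN n ((i + 1) % 25) ^^^ 1) &&& PN n ((i + 2) % 25))

theorem xor_le_one (a b : Nat) (ha : a ≤ 1) (hb : b ≤ 1) : a ^^^ b ≤ 1 := by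
  interval_cases a <;> interval_cases b <;> decide

theorem and_le_one (a b : Nat) (ha : a ≤ 1) (hb : b ≤ 1) : a &&& b ≤ 1 := by
  interval_cases a <;> interval_cases b <;> decide

theorem TN_le (n i : Nat) : TN n i ≤ 1 :=
  xor_le_one _ _ (xor_le_one _ _ (tb_le n i) (tb_le n _)) (tb_le n _)

theorem PN_le (n j : Nat) : PN n j ≤ 1 := TN_le n _

theorem CN_le (n i : Nat) : CN n i ≤ 1 :=
  xor_le_one _ _ (PN_le n i) (and_le_one _ _ (xor_le_one _ _ (PN_le n _) (by norm_num)) (PN_le n _))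

theorem TN_le' {n : Nat} : ∀ i, TN n i ≤ 1 := TN_le n
theorem PN_le' {n : Nat} : ∀ j, PN n j ≤ 1 := PN_le n
theorem CN_le' {n : Nat} : ∀ i, CN n i ≤ 1 := CN_le n

theorem mod25_lt (k : Nat) : k % 25 < 25 := Nat.mod_lt _ (by norm_num)

-- A's theta loop
theorem theta_eq (s : Int) :
    (List.range 25).foldl (fun (theta : Int) (i : Nat) =>
      let bit_i := PySem.Int.band (s >>> i) 1
      let bit_5 := PySem.Int.band (s >>> ((i + 5) % 25)) 1
      let bit_20 := PySem.Int.band (s >>> ((i + 20) % 25)) 1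
      let res_theta := PySem.Int.bxor (PySem.Int.bxor bit_i bit_5) bit_20
      PySem.Int.bor theta (res_theta <<< i)) 0
    = ((pack (TN (pvN s)) 25 : Nat) : Int) := by
  rw [PySem.List.foldl_congr_mem (List.range 25) _
    (fun a i => PySem.Int.bor a (((TN (pvN s) i : Nat) : Int) <<< i)) 0 ?_]
  · exact orfold _ TN_le' 25
  · intro acc i hi
    have hi25 : i < 25 := List.mem_range.mp hi
    show PySem.Int.bor acc
      ((PySem.Int.bxor (PySem.Int.bxor (PySem.Int.band (s >>> i) 1)
        (PySem.Int.band (s >>> ((i + 5) % 25)) 1)) (PySem.Int.band (s >>> ((i + 20) % 25)) 1)) <<< i) = _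
    rw [sbit s i hi25, sbit s ((i + 5) % 25) (mod25_lt _), sbit s ((i + 20) % 25) (mod25_lt _)]
    simp only [PySem.Int.bxor_natCast]
    rfl

-- A's pi loop (with theta already in packed form)
theorem pi_eq (s : Int) :
    (List.range 25).foldl (fun (pi : Int) (i : Nat) =>
      let bit_theta := PySem.Int.band (((pack (TN (pvN s)) 25 : Nat) : Int) >>> i) 1
      let new_pos := (i * 7) % 25
      PySem.Int.bor pi (bit_theta <<< new_pos)) 0
    = ((pack (PN (pvN s)) 25 : Nat) : Int) := by
  rw [PySem.List.foldl_congr_mem (List.range 25) _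
    (fun p i => PySem.Int.bor p (((TN (pvN s) i : Nat) : Int) <<< ((i * 7) % 25))) 0 ?_]
  · have h0 : ((0 : Nat) : Int) = 0 := rfl
    rw [← h0, castfold (TN (pvN s)) (fun i => (i * 7) % 25) (List.range 25) 0,
      scatter_pack (TN (pvN s)) TN_le']
    rfl
  · intro acc i hi
    have hi25 : i < 25 := List.mem_range.mp hi
    show PySem.Int.bor acc
      ((PySem.Int.band (((pack (TN (pvN s)) 25 : Nat) : Int) >>> i) 1) <<< ((i * 7) % 25)) = _
    rw [pack_read _ TN_le' i hi25]

-- A's chi loop (with pi already in packed form)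
theorem chi_eq (s : Int) :
    (List.range 25).foldl (fun (chi : Int) (i : Nat) =>
      let curr_bit := PySem.Int.band (((pack (PN (pvN s)) 25 : Nat) : Int) >>> i) 1
      let next_bit := PySem.Int.band (((pack (PN (pvN s)) 25 : Nat) : Int) >>> ((i + 1) % 25)) 1
      let next2_bit := PySem.Int.band (((pack (PN (pvN s)) 25 : Nat) : Int) >>> ((i + 2) % 25)) 1
      let res_chi := PySem.Int.bxor curr_bit (PySem.Int.band (PySem.Int.bxor next_bit 1) next2_bit)
      PySem.Int.bor chi (res_chi <<< i)) 0
    = ((pack (CN (pvN s)) 25 : Nat) : Int) := by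
  rw [PySem.List.foldl_congr_mem (List.range 25) _
    (fun a i => PySem.Int.bor a (((CN (pvN s) i : Nat) : Int) <<< i)) 0 ?_]
  · exact orfold _ CN_le' 25
  · intro acc i hi
    have hi25 : i < 25 := List.mem_range.mp hi
    show PySem.Int.bor acc
      ((PySem.Int.bxor (PySem.Int.band (((pack (PN (pvN s)) 25 : Nat) : Int) >>> i) 1)
        (PySem.Int.band (PySem.Int.bxor
          (PySem.Int.band (((pack (PN (pvN s)) 25 : Nat) : Int) >>> ((i + 1) % 25)) 1) 1)
          (PySem.Int.band (((pack (PN (pvN s)) 25 : Nat) : Int) >>> ((i + 2) % 25)) 1))) <<< i) = _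
    rw [pack_read _ PN_le' i hi25, pack_read _ PN_le' ((i + 1) % 25) (mod25_lt _),
      pack_read _ PN_le' ((i + 2) % 25) (mod25_lt _)]
    have h1 : (1 : Int) = ((1 : Nat) : Int) := rfl
    rw [h1]
    simp only [PySem.Int.bxor_natCast, PySem.Int.band_natCast]
    rfl

-- A's final masking is the identity on a 25-bit pack
theorem keccak_A_eq (s : Int) : keccak_round s = ((pack (CN (pvN s)) 25 : Nat) : Int) := by
  simp only [keccak_round]
  rw [theta_eq s, pi_eq s, chi_eq s]
  have hm : (0x1FFFFFF : Int) = ((33554431 : Nat) : Int) := rfl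
  rw [hm, PySem.Int.band_natCast]
  have h2 : pack (CN (pvN s)) 25 &&& 33554431 = pack (CN (pvN s)) 25 := by
    have h3 : (33554431 : Nat) = 2 ^ 25 - 1 := by norm_num
    rw [h3, Nat.and_two_pow_sub_one_eq_mod]
    exact Nat.mod_eq_of_lt (pack_lt _ CN_le' 25)
  rw [h2]

-- ===== B-side lemmas =====

-- masking any Int by 0x1FFFFFF is reduction mod 2^25
theorem band_mask (s : Int) : PySem.Int.band s 0x1FFFFFF = ((pvN s : Nat) : Int) := by
  unfold PySem.Int.band
  have h25 : (33554431 : Nat) = 2 ^ 25 - 1 := by norm_num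
  split_ifs with h1 h2 h2
  · have : s.toNat &&& (0x1FFFFFF : Int).toNat = s.toNat % 2 ^ 25 := by
      show s.toNat &&& 33554431 = _
      rw [h25, Nat.and_two_pow_sub_one_eq_mod]
    rw [this]
    unfold pvN; omega
  · exact absurd (by norm_num : (0:Int) ≤ 0x1FFFFFF) h2
  · have : (0x1FFFFFF : Int).toNat &&& (-s - 1).toNat = (-s - 1).toNat % 2 ^ 25 := by
      show 33554431 &&& (-s - 1).toNat = _
      rw [Nat.and_comm, h25, Nat.and_two_pow_sub_one_eq_mod]
    rw [this]
    unfold pvN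
    have hst : (0x1FFFFFF : Int).toNat = 33554431 := rfl
    rw [hst]
    omega
  · exact absurd (by norm_num : (0:Int) ≤ 0x1FFFFFF) h2

-- bit j of the rotated 25-bit word
theorem rot_testBit (m k j : Nat) (hm : m < 2 ^ 25) (hk0 : 0 < k) (hk : k < 25) :
    ((((m >>> k) ||| (m <<< (25 - k))) &&& 33554431).testBit j)
      = (decide (j < 25) && m.testBit ((j + k) % 25)) := by
  have hmask : (33554431 : Nat).testBit j = decide (j < 25) := by
    have h25 : (33554431 : Nat) = 2 ^ 25 - 1 := by norm_num
    rw [h25, Nat.testBit_two_pow_sub_one]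
  rw [Nat.testBit_and, Nat.testBit_lor, Nat.testBit_shiftRight, Nat.testBit_shiftLeft, hmask]
  have hkj : k + j = j + k := Nat.add_comm k j
  by_cases hj : j < 25
  · by_cases hjk : j + k < 25
    · have h1 : (j + k) % 25 = j + k := Nat.mod_eq_of_lt hjk
      have h2 : ¬ (25 - k ≤ j) := by omega
      simp [hkj, h1, h2, hj]
    · have h1 : m.testBit (j + k) = false :=
        Nat.testBit_eq_false_of_lt (lt_of_lt_of_le hm (Nat.pow_le_pow_right (by norm_num) (by omega)))
      have h2 : 25 - k ≤ j := by omega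
      have h3 : j - (25 - k) = (j + k) % 25 := by omega
      simp [hkj, h1, h2, h3, hj]
  · have h1 : m.testBit (j + k) = false :=
      Nat.testBit_eq_false_of_lt (lt_of_lt_of_le hm (Nat.pow_le_pow_right (by norm_num) (by omega)))
    simp [hj, hkj, h1]

-- B's word-parallel theta equals the packed theta bits
theorem theta_word (s : Int) :
    PySem.Int.bxor (PySem.Int.bxor ((pvN s : Nat) : Int) (rotB ((pvN s : Nat) : Int) 5))
        (rotB ((pvN s : Nat) : Int) 20)
      = ((pack (TN (pvN s)) 25 : Nat) : Int) := by
  have hrot : ∀ k : Nat, rotB ((pvN s : Nat) : Int) k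
      = ((((pvN s >>> k) ||| (pvN s <<< (25 - k))) &&& 33554431 : Nat) : Int) := by
    intro k
    unfold rotB
    rw [← Int.natCast_shiftRight, ← Int.natCast_shiftLeft, PySem.Int.bor_natCast]
    have hm : (0x1FFFFFF : Int) = ((33554431 : Nat) : Int) := rfl
    rw [hm, PySem.Int.band_natCast]
  rw [hrot, hrot]
  simp only [PySem.Int.bxor_natCast]
  rw [Int.natCast_inj]
  apply Nat.eq_of_testBit_eq
  intro j
  rw [Nat.testBit_xor, Nat.testBit_xor,
    rot_testBit _ 5 j (pvN_lt s) (by norm_num) (by norm_num),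
    rot_testBit _ 20 j (pvN_lt s) (by norm_num) (by norm_num)]
  by_cases hj : j < 25
  · rw [pack_testBit _ TN_le' 25 j hj]
    simp only [hj, decide_true, Bool.true_and]
    unfold TN tb
    cases h1 : (pvN s).testBit j <;>
      cases h2 : (pvN s).testBit ((j + 5) % 25) <;>
        cases h3 : (pvN s).testBit ((j + 20) % 25) <;> simp
  · rw [pack_testBit_ge _ TN_le' 25 j (by omega)]
    have h1 : (pvN s).testBit j = false :=
      Nat.testBit_eq_false_of_lt (lt_of_lt_of_le (pvN_lt s) (Nat.pow_le_pow_right (by norm_num) (by omega)))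
    simp [hj, h1]

theorem keccak_B_eq (s : Int) : keccak_round_alt s = ((pack (CN (pvN s)) 25 : Nat) : Int) := by
  simp only [keccak_round_alt]
  rw [band_mask s, theta_word s]
  rw [PySem.List.foldl_congr_mem (List.range 25) _
    (fun a i => PySem.Int.bor a (((CN (pvN s) i : Nat) : Int) <<< i)) 0 ?_]
  · exact orfold _ CN_le' 25
  · intro acc i hi
    have hi25 : i < 25 := List.mem_range.mp hi
    show PySem.Int.bor acc
      ((PySem.Int.bxor (PySem.Int.band (((pack (TN (pvN s)) 25 : Nat) : Int) >>> (18 * i % 25)) 1)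
        (PySem.Int.band (PySem.Int.bxor
          (PySem.Int.band (((pack (TN (pvN s)) 25 : Nat) : Int) >>> (18 * (i + 1) % 25)) 1) 1)
          (PySem.Int.band (((pack (TN (pvN s)) 25 : Nat) : Int) >>> (18 * (i + 2) % 25)) 1))) <<< i) = _
    rw [pack_read _ TN_le' (18 * i % 25) (mod25_lt _),
      pack_read _ TN_le' (18 * (i + 1) % 25) (mod25_lt _),
      pack_read _ TN_le' (18 * (i + 2) % 25) (mod25_lt _)]
    have e1 : TN (pvN s) (18 * i % 25) = PN (pvN s) i := by
      unfold PN; congr 1; omega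
    have e2 : TN (pvN s) (18 * (i + 1) % 25) = PN (pvN s) ((i + 1) % 25) := by
      unfold PN; congr 1; omega
    have e3 : TN (pvN s) (18 * (i + 2) % 25) = PN (pvN s) ((i + 2) % 25) := by
      unfold PN; congr 1; omega
    rw [e1, e2, e3]
    have h1 : (1 : Int) = ((1 : Nat) : Int) := rfl
    rw [h1]
    simp only [PySem.Int.bxor_natCast, PySem.Int.band_natCast]
    rfl

-- ===== VERDICT (by name: the statement is the Claim_ definition above) =====
theorem keccak_round_spec : Claim_equal_keccak_round := by
  intro s _
  unfold Spec_keccak_round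
  rw [keccak_A_eq s, keccak_B_eq s]
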